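-- pv_equiv track=rewrite | github.com/karibshams/d2 | app/core/ai_processor.py | _detect_triggers
-- ===== SOURCE A (Python) =====
-- from typing import Dict, List, Tuple, Optional
--
-- def _detect_triggers(comment: str, reply: str, comment_type: str) -> Dict:
--     """Detect GHL workflow triggers"""
--     triggers = {
--         "tags": [],
--         "workflows": []
--     }
--
--     combined_text = f"{comment} {reply}".lower()
--
--     # Lead triggers
--     if comment_type == "lead" or any(word in combined_text for word in ["interested", "price", "buy", "info"]):
--         triggers["tags"].append("hot_lead")
--         triggers["workflows"].append("lead_nurture")
--
--     # Support triggers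
--     if comment_type == "complaint" or any(word in combined_text for word in ["help", "problem", "issue"]):
--         triggers["tags"].append("needs_support")
--         triggers["workflows"].append("customer_service")
--
--     # Testimonial triggers
--     if comment_type == "praise":
--         triggers["tags"].append("happy_customer")
--         triggers["workflows"].append("testimonial_request")
--
--     # High value triggers
--     if any(word in combined_text for word in ["course", "program", "coaching", "consultation"]):
--         triggers["tags"].append("high_value_prospect")
--         triggers["workflows"].append("sales_followup")
--
--     return triggers
-- ===== SOURCE B (Python) =====
-- _TAGS = ["hot_lead", "needs_support", "happy_customer", "high_value_prospect"]
-- _WORKFLOWS = ["lead_nurture", "customer_service", "testimonial_request", "sales_followup"]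
-- _TYPE_RULE = {"lead": 0, "complaint": 1, "praise": 2}
-- _KEYWORD_RULE = [
--     ("interested", 0), ("price", 0), ("buy", 0), ("info", 0),
--     ("help", 1), ("problem", 1), ("issue", 1),
--     ("course", 3), ("program", 3), ("coaching", 3), ("consultation", 3),
-- ]
--
--
-- def _detect_triggers(comment: str, reply: str, comment_type: str):
--     text = (comment + " " + reply).lower()
--     fired = set()
--     if comment_type in _TYPE_RULE:
--         fired.add(_TYPE_RULE[comment_type])
--     for keyword, rule in _KEYWORD_RULE:
--         if keyword in text:
--             fired.add(rule)
--     order = sorted(fired)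
--     return {"tags": [_TAGS[i] for i in order],
--             "workflows": [_WORKFLOWS[i] for i in order]}
-- ===== Notes on version B (the rewrite author's own statement) =====
-- stated objective: alternative
-- what changed: Replaced A's sequential per-rule if-blocks (each with its own any() keyword scan) by an inverted index: a keyword-to-rule-index map and a comment_type-to-rule map are consulted in one pass to build a set of fired rule indices, and tags/workflows are then emitted from parallel arrays over the sorted index set.
import Mathlib
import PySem

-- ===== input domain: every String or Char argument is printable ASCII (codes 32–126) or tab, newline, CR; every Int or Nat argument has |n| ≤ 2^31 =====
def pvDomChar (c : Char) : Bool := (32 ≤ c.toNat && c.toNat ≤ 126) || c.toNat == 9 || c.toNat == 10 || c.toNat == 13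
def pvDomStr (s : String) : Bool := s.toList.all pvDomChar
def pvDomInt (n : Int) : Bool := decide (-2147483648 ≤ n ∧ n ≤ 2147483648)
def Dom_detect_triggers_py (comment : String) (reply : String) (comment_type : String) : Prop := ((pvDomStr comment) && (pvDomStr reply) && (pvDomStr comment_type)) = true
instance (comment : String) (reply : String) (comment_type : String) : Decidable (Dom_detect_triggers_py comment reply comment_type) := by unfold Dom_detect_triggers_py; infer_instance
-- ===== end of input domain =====

-- B replaces A's sequential per-rule if-blocks by an inverted keyword/type → rule-index map,
-- a set of fired rule indices, and staged emission from parallel arrays (alternative structure).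

-- ===== PORT A =====
def detect_triggers_py (comment : String) (reply : String) (comment_type : String) : List (String × List String) :=
  let combined_text : List Char := PySem.Chars.lower (comment.toList ++ [' '] ++ reply.toList)
  let t0 : List String × List String := ([], [])
  -- Lead triggers
  let t1 :=
    if comment_type == "lead" || ["interested", "price", "buy", "info"].any (fun word => PySem.Chars.isIn word.toList combined_text) then
      (t0.1 ++ ["hot_lead"], t0.2 ++ ["lead_nurture"]) else t0
  -- Support triggers
  let t2 :=
    if comment_type == "complaint" || ["help", "problem", "issue"].any (fun word => PySem.Chars.isIn word.toList combined_text) then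
      (t1.1 ++ ["needs_support"], t1.2 ++ ["customer_service"]) else t1
  -- Testimonial triggers
  let t3 :=
    if comment_type == "praise" then
      (t2.1 ++ ["happy_customer"], t2.2 ++ ["testimonial_request"]) else t2
  -- High value triggers
  let t4 :=
    if ["course", "program", "coaching", "consultation"].any (fun word => PySem.Chars.isIn word.toList combined_text) then
      (t3.1 ++ ["high_value_prospect"], t3.2 ++ ["sales_followup"]) else t3
  [("tags", t4.1), ("workflows", t4.2)]

-- ===== PORT B =====
def pvTags : List String := ["hot_lead", "needs_support", "happy_customer", "high_value_prospect"]
def pvWorkflows : List String := ["lead_nurture", "customer_service", "testimonial_request", "sales_followup"]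
def pvTypeRule : PySem.Dict String Nat := PySem.Dict.ofList [("lead", 0), ("complaint", 1), ("praise", 2)]
def pvKeywordRule : List (String × Nat) :=
  [("interested", 0), ("price", 0), ("buy", 0), ("info", 0),
   ("help", 1), ("problem", 1), ("issue", 1),
   ("course", 3), ("program", 3), ("coaching", 3), ("consultation", 3)]

def detect_triggers_py_alt (comment : String) (reply : String) (comment_type : String) : List (String × List String) :=
  let text : List Char := PySem.Chars.lower (comment.toList ++ [' '] ++ reply.toList)
  let fired0 : PySem.Set Nat :=
    match PySem.Dict.get? pvTypeRule comment_type with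
    | some r => PySem.Set.add PySem.Set.empty r
    | none => PySem.Set.empty
  let fired : PySem.Set Nat :=
    pvKeywordRule.foldl
      (fun s p => if PySem.Chars.isIn p.1.toList text then PySem.Set.add s p.2 else s) fired0
  let order : List Nat := PySem.List.sorted fired (fun x => x) false
  [("tags", order.map (fun i => pvTags.getD i "")),
   ("workflows", order.map (fun i => pvWorkflows.getD i ""))]

-- ===== PRECONDITION & SPEC =====
def Spec_detect_triggers_py (comment : String) (reply : String) (comment_type : String) (out : List (String × List String)) : Prop := out = detect_triggers_py_alt comment reply comment_type
instance (comment : String) (reply : String) (comment_type : String) (out : List (String × List String)) : Decidable (Spec_detect_triggers_py comment reply comment_type out) := by unfold Spec_detect_triggers_py; infer_instance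

-- ===== CLAIM (what is proved, stated in full; the proofs are below) =====
def Claim_equal_detect_triggers_py : Prop := ∀ (comment : String) (reply : String) (comment_type : String), Dom_detect_triggers_py comment reply comment_type → Spec_detect_triggers_py comment reply comment_type (detect_triggers_py comment reply comment_type)

-- ===== LEMMAS AND PROOFS =====

-- folding one keyword group (all entries map to the same rule r) adds r iff some keyword matches
theorem pv_foldl_group (text : List Char) (r : Nat) (kws : List String) (s : PySem.Set Nat) :
    (kws.map (fun k => (k, r))).foldl
      (fun s p => if PySem.Chars.isIn p.1.toList text then PySem.Set.add s p.2 else s) s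
    = if kws.any (fun word => PySem.Chars.isIn word.toList text) then PySem.Set.add s r else s := by
  induction kws generalizing s with
  | nil => simp
  | cons k ks ih =>
    simp only [List.map_cons, List.foldl_cons, List.any_cons]
    by_cases h : PySem.Chars.isIn k.toList text = true
    · by_cases ha : (ks.any (fun word => PySem.Chars.isIn word.toList text)) = true <;>
        simp [h, ha, ih]
    · simp [h, ih]

theorem detect_triggers_eq (comment reply comment_type : String) :
    detect_triggers_py comment reply comment_type = detect_triggers_py_alt comment reply comment_type := by
  unfold detect_triggers_py detect_triggers_py_alt
  have hsplit : pvKeywordRule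
      = (["interested", "price", "buy", "info"].map (fun k => (k, 0)))
        ++ (["help", "problem", "issue"].map (fun k => (k, 1)))
        ++ (["course", "program", "coaching", "consultation"].map (fun k => (k, 3))) := rfl
  rw [hsplit]
  simp only [List.foldl_append, pv_foldl_group]
  set text := PySem.Chars.lower (comment.toList ++ [' '] ++ reply.toList) with htext
  have hl : PySem.Dict.get? pvTypeRule "lead" = some 0 := by decide
  have hcm : PySem.Dict.get? pvTypeRule "complaint" = some 1 := by decide
  have hpr : PySem.Dict.get? pvTypeRule "praise" = some 2 := by decide
  by_cases h0 : comment_type = "lead"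
  · subst h0
    by_cases g0 : (["interested", "price", "buy", "info"].any (fun word => PySem.Chars.isIn word.toList text)) = true <;>
    by_cases g1 : (["help", "problem", "issue"].any (fun word => PySem.Chars.isIn word.toList text)) = true <;>
    by_cases g3 : (["course", "program", "coaching", "consultation"].any (fun word => PySem.Chars.isIn word.toList text)) = true <;>
    simp [g0, g1, g3, hl] <;> decide
  by_cases h1 : comment_type = "complaint"
  · subst h1
    by_cases g0 : (["interested", "price", "buy", "info"].any (fun word => PySem.Chars.isIn word.toList text)) = true <;>
    by_cases g1 : (["help", "problem", "issue"].any (fun word => PySem.Chars.isIn word.toList text)) = true <;>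
    by_cases g3 : (["course", "program", "coaching", "consultation"].any (fun word => PySem.Chars.isIn word.toList text)) = true <;>
    simp [g0, g1, g3, hcm] <;> decide
  by_cases h2 : comment_type = "praise"
  · subst h2
    by_cases g0 : (["interested", "price", "buy", "info"].any (fun word => PySem.Chars.isIn word.toList text)) = true <;>
    by_cases g1 : (["help", "problem", "issue"].any (fun word => PySem.Chars.isIn word.toList text)) = true <;>
    by_cases g3 : (["course", "program", "coaching", "consultation"].any (fun word => PySem.Chars.isIn word.toList text)) = true <;>
    simp [g0, g1, g3, hpr] <;> decide
  · have hmk : pvTypeRule = PySem.Dict.mk [("lead", 0), ("complaint", 1), ("praise", 2)] := by decide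
    have hnone : PySem.Dict.get? pvTypeRule comment_type = none := by
      rw [hmk]; simp [Ne.symm h0, Ne.symm h1, Ne.symm h2, PySem.Dict.get?]
    by_cases g0 : (["interested", "price", "buy", "info"].any (fun word => PySem.Chars.isIn word.toList text)) = true <;>
    by_cases g1 : (["help", "problem", "issue"].any (fun word => PySem.Chars.isIn word.toList text)) = true <;>
    by_cases g3 : (["course", "program", "coaching", "consultation"].any (fun word => PySem.Chars.isIn word.toList text)) = true <;>
    simp [g0, g1, g3, hnone, h0, h1, h2] <;> decide

-- ===== VERDICT (by name: the statement is the Claim_ definition above) =====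
theorem detect_triggers_py_spec : Claim_equal_detect_triggers_py := by
  intro comment reply comment_type _
  exact detect_triggers_eq comment reply comment_type
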